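-- pv_equiv track=rewrite | github.com/fanste992-code/sensorguard | backend/hvac.py | _pivot_instance_rows
-- ===== SOURCE A (Python) =====
-- from typing import Dict, List, Optional, Any
--
-- def _pivot_instance_rows(reader, instance_col: str, timestamp_col: Optional[str]):
--     """
--     Pivot rows by instance ID so that data from different instances at the same
--     timestamp becomes columns in a single row.
--
--     E.g., rows with IMU_I=0 and IMU_I=1 at same timestamp become:
--     {IMU_AccX_I0: val, IMU_AccX_I1: val, ...}
--
--     Returns: (pivoted_rows, unique_instances_set)
--     """
--     from collections import defaultdict, OrderedDict
--
--     # Read all rows first to detect columns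
--     all_rows = list(reader)
--     if not all_rows:
--         return [], set()
--
--     # Auto-detect timestamp column if not specified
--     if not timestamp_col:
--         # Look for common timestamp column names
--         first_row = all_rows[0]
--         for candidate in ['Time', 'Timestamp', 'time', 'timestamp', 'TimeUS', 'time_boot_ms']:
--             if candidate in first_row:
--                 timestamp_col = candidate
--                 break
--
--     # Track all unique instance IDs seen
--     unique_instances = set()
--
--     # Group rows by timestamp
--     # Use OrderedDict to preserve row order for same timestamps
--     ts_groups: Dict[str, Dict[str, Dict[str, str]]] = OrderedDict()
--
--     for row_idx, row in enumerate(all_rows):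
--         instance = row.get(instance_col, "0").strip()
--         unique_instances.add(instance)
--
--         # Get timestamp - use row index as fallback
--         if timestamp_col and timestamp_col in row:
--             ts_key = row[timestamp_col].strip()
--         else:
--             # Group consecutive rows with same row_idx // 2 (assumes alternating instances)
--             ts_key = str(row_idx // 2)
--
--         if ts_key not in ts_groups:
--             ts_groups[ts_key] = {}
--         ts_groups[ts_key][instance] = row
--
--     # Build pivoted rows
--     pivoted = []
--     skip_cols = {instance_col}  # Don't duplicate instance column
--
--     for ts_key, instances in ts_groups.items():
--         merged = {}
--
--         # Keep timestamp column
--         if timestamp_col: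
--             for inst_data in instances.values():
--                 if timestamp_col in inst_data:
--                     merged[timestamp_col] = inst_data[timestamp_col]
--                     break
--
--         # Merge data from each instance with suffixed column names
--         for inst_id, inst_data in instances.items():
--             for col, val in inst_data.items():
--                 if col in skip_cols or col == timestamp_col:
--                     continue
--                 # Create instance-suffixed column name: IMU_AccX -> IMU_AccX_I0
--                 merged[f"{col}_I{inst_id}"] = val
--
--         pivoted.append(merged)
--
--     return pivoted, unique_instances
-- ===== SOURCE B (Python) =====
-- CANDIDATES = ['Time', 'Timestamp', 'time', 'timestamp', 'TimeUS', 'time_boot_ms']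
--
--
-- def _pivot_instance_rows(reader, instance_col, timestamp_col):
--     """
--     Pivot rows by instance ID: a declarative group-by.  First annotate every
--     row with its (group key, instance) pair; then, for each distinct group key
--     in order of first appearance, merge the latest row of each distinct
--     instance into one wide row with instance-suffixed column names.
--     """
--     rows = list(reader)
--     if not rows:
--         return [], set()
--
--     if not timestamp_col:
--         timestamp_col = next((c for c in CANDIDATES if c in rows[0]), timestamp_col)
--
--     keyed = []
--     for idx, row in enumerate(rows):
--         inst = row.get(instance_col, "0").strip()
--         if timestamp_col and timestamp_col in row:
--             ts = row[timestamp_col].strip()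
--         else:
--             ts = str(idx // 2)
--         keyed.append((ts, inst, row))
--
--     unique_instances = set(inst for _, inst, _ in keyed)
--
--     pivoted = []
--     for ts in dict.fromkeys(t for t, _, _ in keyed):
--         group = [(i, r) for t, i, r in keyed if t == ts]
--         insts = list(dict.fromkeys(i for i, _ in group))
--
--         def latest(i):
--             return [r for j, r in group if j == i][-1]
--
--         merged = {}
--         if timestamp_col:
--             for i in insts:
--                 r = latest(i)
--                 if timestamp_col in r:
--                     merged[timestamp_col] = r[timestamp_col]
--                     break
--         for i in insts:
--             for col, val in latest(i).items():
--                 if col != instance_col and col != timestamp_col: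
--                     merged[f"{col}_I{i}"] = val
--         pivoted.append(merged)
--
--     return pivoted, unique_instances
-- ===== Notes on version B (the rewrite author's own statement) =====
-- stated objective: alternative
-- what changed: Replaces A's incrementally built OrderedDict-of-dicts grouping (insert/overwrite per row, then a second merge pass over the nested dict) with a declarative group-by: annotate each row once with its (ts_key, instance) pair, then build each output row by comprehension-style dedup/filter — distinct ts keys in first-seen order, distinct instances per group, latest row per instance.
import Mathlib
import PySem

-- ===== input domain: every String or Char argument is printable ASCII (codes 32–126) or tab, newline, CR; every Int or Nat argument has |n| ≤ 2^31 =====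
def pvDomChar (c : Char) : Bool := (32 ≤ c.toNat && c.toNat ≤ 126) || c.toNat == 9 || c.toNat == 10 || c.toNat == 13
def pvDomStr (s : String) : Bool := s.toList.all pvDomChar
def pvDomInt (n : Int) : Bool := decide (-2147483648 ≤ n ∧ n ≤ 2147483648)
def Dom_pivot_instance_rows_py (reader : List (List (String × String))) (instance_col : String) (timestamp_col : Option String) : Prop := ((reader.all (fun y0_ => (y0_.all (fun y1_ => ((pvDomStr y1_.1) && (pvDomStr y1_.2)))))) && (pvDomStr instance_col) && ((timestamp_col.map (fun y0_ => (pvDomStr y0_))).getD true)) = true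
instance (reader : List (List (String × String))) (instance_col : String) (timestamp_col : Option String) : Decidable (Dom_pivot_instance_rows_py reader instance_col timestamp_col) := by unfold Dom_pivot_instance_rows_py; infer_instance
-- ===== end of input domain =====

-- B re-implements the pivot as a declarative group-by (annotate rows with keys, then comprehension-style
-- dedup/filter per group) instead of A's incrementally built nested dict-of-dicts; objective: alternative.

-- candidate timestamp column names (module constant shared by both sources)
def pvCandidates : List String := ["Time", "Timestamp", "time", "timestamp", "TimeUS", "time_boot_ms"]

-- ===== PORT A =====

-- A's auto-detect loop: 'for candidate in […]: if candidate in first_row: timestamp_col = candidate; break'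
def aDetect : List String → List (String × String) → Option String → Option String
  | [], _, t => t
  | c :: cs, row, t => if (PySem.Dict.mk row).contains c then some c else aDetect cs row t

-- A's 'for inst_data in instances.values(): if timestamp_col in inst_data: … break'
def aFindTs (t : String) : List (List (String × String)) → Option String
  | [] => none
  | r :: rs =>
    match (PySem.Dict.mk r).get? t with
    | some v => some v
    | none => aFindTs t rs

def pivot_instance_rows_py (reader : List (List (String × String))) (instance_col : String) (timestamp_col : Option String) : (List (List (String × String))) × List String :=
  match reader with
  | [] => ([], [])
  | first_row :: _ =>
    let tcol : Option String :=
      if (match timestamp_col with | none => true | some s => s == "") then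
        aDetect pvCandidates first_row timestamp_col
      else timestamp_col
    -- pass 1: unique_instances and ts_groups, one fold over enumerate(all_rows)
    let st :=
      (PySem.List.enumerate reader).foldl
        (fun (st : PySem.Set String × PySem.Dict String (PySem.Dict String (List (String × String)))) p =>
          (PySem.Set.add st.1 (PySem.Str.strip ((PySem.Dict.mk p.2).getD instance_col "0")),
           (st.2.setdefault
              (match tcol with
               | some t =>
                 if (!(t == "")) && (PySem.Dict.mk p.2).contains t then
                   PySem.Str.strip (((PySem.Dict.mk p.2).get? t).getD "")
                 else PySem.Int.toStr (PySem.Int.floordiv p.1 2)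
               | none => PySem.Int.toStr (PySem.Int.floordiv p.1 2)) PySem.Dict.empty).modify
             (match tcol with
              | some t =>
                if (!(t == "")) && (PySem.Dict.mk p.2).contains t then
                  PySem.Str.strip (((PySem.Dict.mk p.2).get? t).getD "")
                else PySem.Int.toStr (PySem.Int.floordiv p.1 2)
              | none => PySem.Int.toStr (PySem.Int.floordiv p.1 2)) PySem.Dict.empty
             (fun inner => inner.insert (PySem.Str.strip ((PySem.Dict.mk p.2).getD instance_col "0")) p.2)))
        (PySem.Set.empty, PySem.Dict.empty)
    -- pass 2: build pivoted rows from ts_groups.items()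
    let pivoted :=
      st.2.items.map (fun g =>
        let merged0 : PySem.Dict String String :=
          match tcol with
          | some t =>
            if t == "" then PySem.Dict.empty
            else
              match aFindTs t g.2.values with
              | some v => PySem.Dict.empty.insert t v
              | none => PySem.Dict.empty
          | none => PySem.Dict.empty
        let merged :=
          g.2.items.foldl (fun m ir =>
            ir.2.foldl (fun m cv =>
              if cv.1 == instance_col || (match tcol with | some t => cv.1 == t | none => false) then m
              else m.insert (cv.1 ++ "_I" ++ ir.1) cv.2) m) merged0
        merged.items)
    (pivoted, st.1)

-- ===== PORT B =====

-- B's 'for i in insts: r = latest(i); if timestamp_col in r: … break'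
def bFirstTs (t : String) (latest : String → List (String × String)) : List String → Option String
  | [] => none
  | i :: is =>
    match (PySem.Dict.mk (latest i)).get? t with
    | some v => some v
    | none => bFirstTs t latest is

def pivot_instance_rows_py_alt (reader : List (List (String × String))) (instance_col : String) (timestamp_col : Option String) : (List (List (String × String))) × List String :=
  match reader with
  | [] => ([], [])
  | first :: _ =>
    let tcol : Option String :=
      if (match timestamp_col with | none => true | some s => s == "") then
        (match pvCandidates.find? (fun c => (PySem.Dict.mk first).contains c) with
         | some c => some c
         | none => timestamp_col)
      else timestamp_col
    -- annotate every row with its (group key, instance) pair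
    let keyed : List (String × String × List (String × String)) :=
      (PySem.List.enumerate reader).map (fun p =>
        (match tcol with
         | some t =>
           if (!(t == "")) && (PySem.Dict.mk p.2).contains t then
             PySem.Str.strip (((PySem.Dict.mk p.2).get? t).getD "")
           else PySem.Int.toStr (PySem.Int.floordiv p.1 2)
         | none => PySem.Int.toStr (PySem.Int.floordiv p.1 2),
         PySem.Str.strip ((PySem.Dict.mk p.2).getD instance_col "0"),
         p.2))
    let uniq : PySem.Set String := PySem.Set.ofList (keyed.map (fun x => x.2.1))
    -- one wide row per distinct group key, in first-appearance order
    let pivoted :=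
      (PySem.List.dedup (keyed.map (fun x => x.1))).map (fun ts =>
        let group := (keyed.filter (fun x => x.1 == ts)).map (fun x => x.2)
        let insts := PySem.List.dedup (group.map (fun x => x.1))
        let latest := fun i => ((group.filter (fun x => x.1 == i)).map (fun x => x.2)).getLastD []
        let merged0 : PySem.Dict String String :=
          match tcol with
          | some t =>
            if t == "" then PySem.Dict.empty
            else
              match bFirstTs t latest insts with
              | some v => PySem.Dict.empty.insert t v
              | none => PySem.Dict.empty
          | none => PySem.Dict.empty
        let merged :=
          insts.foldl (fun m i =>
            (latest i).foldl (fun m cv =>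
              if cv.1 == instance_col || (match tcol with | some t => cv.1 == t | none => false) then m
              else m.insert (cv.1 ++ "_I" ++ i) cv.2) m) merged0
        merged.items)
    (pivoted, uniq)

-- ===== PRECONDITION & SPEC =====
def Spec_pivot_instance_rows_py (reader : List (List (String × String))) (instance_col : String) (timestamp_col : Option String) (out : (List (List (String × String))) × List String) : Prop := out = pivot_instance_rows_py_alt reader instance_col timestamp_col
instance (reader : List (List (String × String))) (instance_col : String) (timestamp_col : Option String) (out : (List (List (String × String))) × List String) : Decidable (Spec_pivot_instance_rows_py reader instance_col timestamp_col out) := by unfold Spec_pivot_instance_rows_py; infer_instance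

-- ===== CLAIM (what is proved, stated in full; the proofs are below) =====
def Claim_equal_pivot_instance_rows_py : Prop := ∀ (reader : List (List (String × String))) (instance_col : String) (timestamp_col : Option String), Dom_pivot_instance_rows_py reader instance_col timestamp_col → Spec_pivot_instance_rows_py reader instance_col timestamp_col (pivot_instance_rows_py reader instance_col timestamp_col)

-- ===== LEMMAS AND PROOFS =====

-- the per-row key/instance annotation both passes compute
def pvKf (tcol : Option String) (instance_col : String) (p : Int × List (String × String)) : String × String × List (String × String) :=
  (match tcol with
   | some t =>
     if (!(t == "")) && (PySem.Dict.mk p.2).contains t then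
       PySem.Str.strip (((PySem.Dict.mk p.2).get? t).getD "")
     else PySem.Int.toStr (PySem.Int.floordiv p.1 2)
   | none => PySem.Int.toStr (PySem.Int.floordiv p.1 2),
   PySem.Str.strip ((PySem.Dict.mk p.2).getD instance_col "0"),
   p.2)

-- A's grouping step and its fold
def pvGStep (G : PySem.Dict String (PySem.Dict String (List (String × String)))) (x : String × String × List (String × String)) : PySem.Dict String (PySem.Dict String (List (String × String))) :=
  (G.setdefault x.1 PySem.Dict.empty).modify x.1 PySem.Dict.empty (fun inner => inner.insert x.2.1 x.2.2)

def pvGG (l : List (String × String × List (String × String))) : PySem.Dict String (PySem.Dict String (List (String × String))) :=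
  l.foldl pvGStep PySem.Dict.empty

-- B's "latest row of instance i in the group"
def pvLastOf (i : String) (g : List (String × List (String × String))) : List (String × String) :=
  ((g.filter (fun x => x.1 == i)).map (fun x => x.2)).getLastD []

-- the inner per-timestamp dict, built by sequential insertion
def pvInner (g : List (String × List (String × String))) : PySem.Dict String (List (String × String)) :=
  g.foldl (fun d x => d.insert x.1 x.2) PySem.Dict.empty

theorem pvDetect_eq (cs : List String) (row : List (String × String)) (t : Option String) :
    aDetect cs row t = (match cs.find? (fun c => (PySem.Dict.mk row).contains c) with
                        | some c => some c
                        | none => t) := by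
  induction cs with
  | nil => rfl
  | cons c cs ih =>
    by_cases h : (PySem.Dict.mk row).contains c = true
    · simp [aDetect, List.find?, h]
    · simp only [Bool.not_eq_true] at h
      simp [aDetect, List.find?, h, ih]

theorem pvFindTs_eq (t : String) (latest : String → List (String × String)) (is : List String) :
    aFindTs t (is.map latest) = bFirstTs t latest is := by
  induction is with
  | nil => rfl
  | cons i is ih => simp only [List.map_cons, aFindTs, bFirstTs, ih]

theorem pvLastOf_append_self (i : String) (g : List (String × List (String × String)))
    (x : String × List (String × String)) (h : x.1 = i) : pvLastOf i (g ++ [x]) = x.2 := by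
  simp [pvLastOf, List.filter_append, List.filter, h]

theorem pvLastOf_append_ne (i : String) (g : List (String × List (String × String)))
    (x : String × List (String × String)) (h : x.1 ≠ i) : pvLastOf i (g ++ [x]) = pvLastOf i g := by
  have hfx : (List.filter (fun y => y.1 == i) [x]) = [] := by
    simp [List.filter, show (x.1 == i) = false by simpa using h]
  simp [pvLastOf, List.filter_append, hfx]

theorem pvInner_items (g : List (String × List (String × String))) :
    (pvInner g).items = (PySem.List.dedup (g.map (fun x => x.1))).map (fun i => (i, pvLastOf i g)) := by
  induction g using List.reverseRecOn with
  | nil => rfl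
  | append_singleton g x ih =>
    have hfold : pvInner (g ++ [x]) = (pvInner g).insert x.1 x.2 := by
      simp [pvInner, List.foldl_append]
    have hkeys : (pvInner g).keys = PySem.List.dedup (g.map (fun x => x.1)) := by
      simp only [PySem.Dict.keys, ih, List.map_map]
      exact List.map_id _
    have hcont : (pvInner g).contains x.1 = decide (x.1 ∈ g.map (fun x => x.1)) := by
      rw [PySem.Dict.contains_eq_decide_mem_keys, hkeys]
      simp [PySem.List.dedup, PySem.Set.mem_ofList]
    by_cases hx : x.1 ∈ g.map (fun x => x.1)
    · rw [hfold, PySem.Dict.items_insert_of_contains _ _ (by rw [hcont]; exact decide_eq_true hx)]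
      rw [ih, List.map_map]
      simp only [PySem.List.dedup, List.map_append, List.map_cons, List.map_nil,
        PySem.Set.ofList_append_singleton]
      rw [PySem.Set.add_of_mem (by rwa [PySem.Set.mem_ofList])]
      apply List.map_congr_left
      intro i hi
      by_cases hie : i = x.1
      · subst hie
        simp only [Function.comp, beq_self_eq_true, if_pos]
        exact congrArg _ (pvLastOf_append_self _ _ _ rfl).symm
      · have hbe : (i == x.1) = false := by simpa using hie
        simp only [Function.comp, hbe, Bool.false_eq_true, if_false]
        rw [pvLastOf_append_ne _ _ _ (fun h => hie h.symm)]
    · rw [hfold, PySem.Dict.items_insert_of_not_contains _ _ (by rw [hcont]; exact decide_eq_false hx)]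
      rw [ih]
      simp only [PySem.List.dedup, List.map_append, List.map_cons, List.map_nil,
        PySem.Set.ofList_append_singleton]
      rw [PySem.Set.add_of_not_mem (by rwa [PySem.Set.mem_ofList]), List.map_append]
      congr 1
      · apply List.map_congr_left
        intro i hi
        have hmem : i ∈ g.map (fun x => x.1) := (PySem.Set.mem_ofList _ _).mp hi
        have hie : x.1 ≠ i := fun h => hx (h ▸ hmem)
        rw [pvLastOf_append_ne _ _ _ hie]
      · simp [pvLastOf, List.filter_append, List.filter]
theorem pvFind?_map {β : Type} (ds : List String) (F : String → β) (t : String) (h : t ∈ ds) :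
    (ds.map (fun d => (d, F d))).find? (fun p => p.1 == t) = some (t, F t) := by
  induction ds with
  | nil => cases h
  | cons d ds ih =>
    by_cases hd : d = t
    · subst hd; simp
    · have hbe : (d == t) = false := by simpa using hd
      rcases List.mem_cons.mp h with h | h
      · exact absurd h.symm hd
      · simp only [List.map_cons, List.find?, hbe]
        exact ih h

theorem pvGG_items (l : List (String × String × List (String × String))) :
    (pvGG l).items = (PySem.List.dedup (l.map (fun x => x.1))).map
      (fun t => (t, pvInner ((l.filter (fun x => x.1 == t)).map (fun x => x.2)))) := by
  induction l using List.reverseRecOn with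
  | nil => rfl
  | append_singleton l x ih =>
    have hfold : pvGG (l ++ [x]) = pvGStep (pvGG l) x := by
      simp [pvGG, List.foldl_append]
    have hkeys : (pvGG l).keys = PySem.List.dedup (l.map (fun x => x.1)) := by
      simp only [PySem.Dict.keys, ih, List.map_map]
      exact List.map_id _
    have hcont : (pvGG l).contains x.1 = decide (x.1 ∈ l.map (fun x => x.1)) := by
      rw [PySem.Dict.contains_eq_decide_mem_keys, hkeys]
      simp [PySem.List.dedup, PySem.Set.mem_ofList]
    by_cases hx : x.1 ∈ l.map (fun x => x.1)
    · have hc : (pvGG l).contains x.1 = true := by rw [hcont]; exact decide_eq_true hx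
      have hget : (pvGG l).getD x.1 PySem.Dict.empty
          = pvInner ((l.filter (fun y => y.1 == x.1)).map (fun y => y.2)) := by
        rw [PySem.Dict.getD_eq_get?_getD]
        unfold PySem.Dict.get?
        rw [ih, pvFind?_map _ _ _ (by rwa [PySem.List.dedup, PySem.Set.mem_ofList])]
        rfl
      rw [hfold]
      unfold pvGStep
      rw [PySem.Dict.setdefault_of_contains _ _ hc]
      unfold PySem.Dict.modify
      rw [PySem.Dict.items_insert_of_contains _ _ hc, ih, List.map_map, hget]
      simp only [PySem.List.dedup, List.map_append, List.map_cons, List.map_nil,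
        PySem.Set.ofList_append_singleton]
      rw [PySem.Set.add_of_mem (by rwa [PySem.Set.mem_ofList])]
      apply List.map_congr_left
      intro t ht
      by_cases hte : t = x.1
      · subst hte
        simp only [Function.comp, beq_self_eq_true, if_pos]
        have hflt : ((l ++ [x]).filter (fun y => y.1 == x.1)) = l.filter (fun y => y.1 == x.1) ++ [x] := by
          simp [List.filter_append]
        rw [hflt, List.map_append]
        simp [pvInner, List.foldl_append]
      · have hbe : (t == x.1) = false := by simpa using hte
        simp only [Function.comp, hbe, Bool.false_eq_true, if_false]
        have hflt : ((l ++ [x]).filter (fun y => y.1 == t)) = l.filter (fun y => y.1 == t) := by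
          simp [List.filter_append, show (x.1 == t) = false by simpa using fun h => hte h.symm]
        rw [hflt]
    · have hc : (pvGG l).contains x.1 = false := by rw [hcont]; exact decide_eq_false hx
      rw [hfold]
      unfold pvGStep
      rw [PySem.Dict.setdefault_of_not_contains _ _ hc]
      unfold PySem.Dict.modify
      rw [PySem.Dict.getD_eq_get?_getD, PySem.Dict.get?_insert_self]
      rw [PySem.Dict.insert_insert_self]
      rw [PySem.Dict.items_insert_of_not_contains _ _ hc, ih]
      simp only [PySem.List.dedup, List.map_append, List.map_cons, List.map_nil,
        PySem.Set.ofList_append_singleton]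
      rw [PySem.Set.add_of_not_mem (by rwa [PySem.Set.mem_ofList]), List.map_append]
      congr 1
      · apply List.map_congr_left
        intro t ht
        have hmem : t ∈ l.map (fun x => x.1) := (PySem.Set.mem_ofList _ _).mp ht
        have hte : x.1 ≠ t := fun h => hx (h ▸ hmem)
        have hflt : ((l ++ [x]).filter (fun y => y.1 == t)) = l.filter (fun y => y.1 == t) := by
          simp [List.filter_append, show (x.1 == t) = false by simpa using hte]
        rw [hflt]
      · have hfl : (l.filter (fun y => y.1 == x.1)) = [] := by
          rw [List.filter_eq_nil_iff]
          intro y hy h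
          exact hx (List.mem_map.mpr ⟨y, hy, by simpa using h⟩)
        simp [List.filter_append, hfl, pvInner]
-- literal copies of the two port bodies with the detected timestamp column abstracted out
def pvAbody (reader : List (List (String × String))) (instance_col : String) (tcol : Option String) : (List (List (String × String))) × List String :=
  let st :=
    (PySem.List.enumerate reader).foldl
      (fun st p => (PySem.Set.add st.1 (pvKf tcol instance_col p).2.1, pvGStep st.2 (pvKf tcol instance_col p)))
      (PySem.Set.empty, PySem.Dict.empty)
  (st.2.items.map (fun g =>
    let merged0 : PySem.Dict String String :=
      match tcol with
      | some t =>
        if t == "" then PySem.Dict.empty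
        else
          match aFindTs t g.2.values with
          | some v => PySem.Dict.empty.insert t v
          | none => PySem.Dict.empty
      | none => PySem.Dict.empty
    (g.2.items.foldl (fun m ir =>
      ir.2.foldl (fun m cv =>
        if cv.1 == instance_col || (match tcol with | some t => cv.1 == t | none => false) then m
        else m.insert (cv.1 ++ "_I" ++ ir.1) cv.2) m) merged0).items), st.1)

def pvBbody (reader : List (List (String × String))) (instance_col : String) (tcol : Option String) : (List (List (String × String))) × List String :=
  let keyed := (PySem.List.enumerate reader).map (pvKf tcol instance_col)
  ((PySem.List.dedup (keyed.map (fun x => x.1))).map (fun ts =>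
    let group := (keyed.filter (fun x => x.1 == ts)).map (fun x => x.2)
    let insts := PySem.List.dedup (group.map (fun x => x.1))
    let merged0 : PySem.Dict String String :=
      match tcol with
      | some t =>
        if t == "" then PySem.Dict.empty
        else
          match bFirstTs t (fun i => pvLastOf i group) insts with
          | some v => PySem.Dict.empty.insert t v
          | none => PySem.Dict.empty
      | none => PySem.Dict.empty
    (insts.foldl (fun m i =>
      (pvLastOf i group).foldl (fun m cv =>
        if cv.1 == instance_col || (match tcol with | some t => cv.1 == t | none => false) then m
        else m.insert (cv.1 ++ "_I" ++ i) cv.2) m) merged0).items),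
   PySem.Set.ofList (keyed.map (fun x => x.2.1)))

theorem pvA_unfold (first : List (String × String)) (rest : List (List (String × String))) (instance_col : String) (timestamp_col : Option String) :
    pivot_instance_rows_py (first :: rest) instance_col timestamp_col
      = pvAbody (first :: rest) instance_col
          (if (match timestamp_col with | none => true | some s => s == "") then
             aDetect pvCandidates first timestamp_col
           else timestamp_col) := rfl

theorem pvB_unfold (first : List (String × String)) (rest : List (List (String × String))) (instance_col : String) (timestamp_col : Option String) :
    pivot_instance_rows_py_alt (first :: rest) instance_col timestamp_col
      = pvBbody (first :: rest) instance_col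
          (if (match timestamp_col with | none => true | some s => s == "") then
             (match pvCandidates.find? (fun c => (PySem.Dict.mk first).contains c) with
              | some c => some c
              | none => timestamp_col)
           else timestamp_col) := rfl

-- the merge stage: folding A's inner dict items equals B's fold over deduped instances with latest rows
theorem pvMerge_eq (instance_col : String) (tcol : Option String) (group : List (String × List (String × String))) :
    ((pvInner group).items.foldl (fun (m : PySem.Dict String String) (ir : String × List (String × String)) =>
        ir.2.foldl (fun (m : PySem.Dict String String) (cv : String × String) =>
          if cv.1 == instance_col || (match tcol with | some t => cv.1 == t | none => false) then m
          else m.insert (cv.1 ++ "_I" ++ ir.1) cv.2) m)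
      (match tcol with
       | some t =>
         if t == "" then PySem.Dict.empty
         else
           match aFindTs t (pvInner group).values with
           | some v => PySem.Dict.empty.insert t v
           | none => PySem.Dict.empty
       | none => PySem.Dict.empty)).items
    = ((PySem.List.dedup (group.map (fun x => x.1))).foldl (fun (m : PySem.Dict String String) (i : String) =>
        (pvLastOf i group).foldl (fun (m : PySem.Dict String String) (cv : String × String) =>
          if cv.1 == instance_col || (match tcol with | some t => cv.1 == t | none => false) then m
          else m.insert (cv.1 ++ "_I" ++ i) cv.2) m)
      (match tcol with
       | some t =>
         if t == "" then PySem.Dict.empty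
         else
           match bFirstTs t (fun i => pvLastOf i group) (PySem.List.dedup (group.map (fun x => x.1))) with
           | some v => PySem.Dict.empty.insert t v
           | none => PySem.Dict.empty
       | none => PySem.Dict.empty)).items := by
  have hv : (pvInner group).values
      = (PySem.List.dedup (group.map (fun x => x.1))).map (fun i => pvLastOf i group) := by
    unfold PySem.Dict.values
    rw [pvInner_items, List.map_map]
    rfl
  have hm0 : (match tcol with
       | some t =>
         if t == "" then PySem.Dict.empty
         else
           match aFindTs t (pvInner group).values with
           | some v => PySem.Dict.empty.insert t v
           | none => PySem.Dict.empty
       | none => (PySem.Dict.empty : PySem.Dict String String))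
      = (match tcol with
       | some t =>
         if t == "" then PySem.Dict.empty
         else
           match bFirstTs t (fun i => pvLastOf i group) (PySem.List.dedup (group.map (fun x => x.1))) with
           | some v => PySem.Dict.empty.insert t v
           | none => PySem.Dict.empty
       | none => PySem.Dict.empty) := by
    cases tcol with
    | none => rfl
    | some t =>
      rw [hv]
      simp only [pvFindTs_eq]
  rw [hm0, pvInner_items, List.foldl_map]

theorem pvBody_eq (reader : List (List (String × String))) (instance_col : String) (tcol : Option String) :
    pvAbody reader instance_col tcol = pvBbody reader instance_col tcol := by
  cases tcol with
  | none =>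
    have h1 : (PySem.List.enumerate reader).foldl
        (fun st p => (PySem.Set.add st.1 (pvKf none instance_col p).2.1, pvGStep st.2 (pvKf none instance_col p)))
        (PySem.Set.empty, PySem.Dict.empty)
        = (PySem.Set.ofList (((PySem.List.enumerate reader).map (pvKf none instance_col)).map (fun x => x.2.1)),
           pvGG ((PySem.List.enumerate reader).map (pvKf none instance_col))) := by
      rw [PySem.List.foldl_prod_mk (fun s p => PySem.Set.add s (pvKf none instance_col p).2.1)
        (fun G p => pvGStep G (pvKf none instance_col p))]
      refine congrArg₂ Prod.mk ?_ ?_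
      · rw [List.map_map, PySem.Set.ofList_eq_foldl]
        exact (List.foldl_map).symm
      · exact (List.foldl_map).symm
    simp only [pvAbody, pvBbody]
    rw [h1]
    refine congrArg₂ Prod.mk ?_ rfl
    rw [pvGG_items, List.map_map]
    refine List.map_congr_left fun ts hts => ?_
    exact pvMerge_eq instance_col none
      ((((PySem.List.enumerate reader).map (pvKf none instance_col)).filter (fun x => x.1 == ts)).map (fun x => x.2))
  | some t =>
    have h1 : (PySem.List.enumerate reader).foldl
        (fun st p => (PySem.Set.add st.1 (pvKf (some t) instance_col p).2.1, pvGStep st.2 (pvKf (some t) instance_col p)))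
        (PySem.Set.empty, PySem.Dict.empty)
        = (PySem.Set.ofList (((PySem.List.enumerate reader).map (pvKf (some t) instance_col)).map (fun x => x.2.1)),
           pvGG ((PySem.List.enumerate reader).map (pvKf (some t) instance_col))) := by
      rw [PySem.List.foldl_prod_mk (fun s p => PySem.Set.add s (pvKf (some t) instance_col p).2.1)
        (fun G p => pvGStep G (pvKf (some t) instance_col p))]
      refine congrArg₂ Prod.mk ?_ ?_
      · rw [List.map_map, PySem.Set.ofList_eq_foldl]
        exact (List.foldl_map).symm
      · exact (List.foldl_map).symm
    simp only [pvAbody, pvBbody]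
    rw [h1]
    refine congrArg₂ Prod.mk ?_ rfl
    rw [pvGG_items, List.map_map]
    refine List.map_congr_left fun ts hts => ?_
    exact pvMerge_eq instance_col (some t)
      ((((PySem.List.enumerate reader).map (pvKf (some t) instance_col)).filter (fun x => x.1 == ts)).map (fun x => x.2))


-- ===== VERDICT (by name: the statement is the Claim_ definition above) =====
theorem pivot_instance_rows_py_spec : Claim_equal_pivot_instance_rows_py := by
  intro reader instance_col timestamp_col _
  unfold Spec_pivot_instance_rows_py
  cases reader with
  | nil => rfl
  | cons first rest =>
    rw [pvA_unfold, pvB_unfold, pvBody_eq, pvDetect_eq]
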